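-- pv_equiv track=rewrite | github.com/ronkell-MS/DSIL | boxpushing/box_push_problem.py | checkIfCollabPush
-- ===== SOURCE A (Python) =====
-- def checkIfCollabPush(action):
--     "action is string like sample1Xidle.."
--     action_arr = action.split('X')
--     collab_push_actions =['CpushUp','CpushDown','CpushLeft','CpushRight']
--     sample_actions =[]
--     action_dict={}
--     for i in range(1,4):
--         for j in range(len(collab_push_actions)):
--             action_withboxindex = collab_push_actions[j] +str(i)
--             sample_actions.append(action_withboxindex)
--
--     for i in range(len(action_arr)):
--         if action_arr[i] in sample_actions:
--             action_dict[action_arr[i]] = action_dict[action_arr[i]] + 1 if action_arr[i] in action_dict.keys() else 1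
--             if action_dict[action_arr[i]] >= 2:
--                 return True
--
--
--     return False
-- ===== SOURCE B (Python) =====
-- def checkIfCollabPush(action):
--     "action is string like sample1Xidle.."
--     samples = {name + str(i)
--                for name in ('CpushUp', 'CpushDown', 'CpushLeft', 'CpushRight')
--                for i in (1, 2, 3)}
--     collab = [a for a in action.split('X') if a in samples]
--     return len(collab) != len(set(collab))
-- ===== Notes on version B (the rewrite author's own statement) =====
-- stated objective: simpler
-- what changed: Replaces A's incremental counting loop (a running-count dict over the split tokens with an early return on a second hit) by a declarative pipeline: filter the split tokens to the collab-push names, then report a repeat as len(collab) != len(set(collab)).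
import Mathlib
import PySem

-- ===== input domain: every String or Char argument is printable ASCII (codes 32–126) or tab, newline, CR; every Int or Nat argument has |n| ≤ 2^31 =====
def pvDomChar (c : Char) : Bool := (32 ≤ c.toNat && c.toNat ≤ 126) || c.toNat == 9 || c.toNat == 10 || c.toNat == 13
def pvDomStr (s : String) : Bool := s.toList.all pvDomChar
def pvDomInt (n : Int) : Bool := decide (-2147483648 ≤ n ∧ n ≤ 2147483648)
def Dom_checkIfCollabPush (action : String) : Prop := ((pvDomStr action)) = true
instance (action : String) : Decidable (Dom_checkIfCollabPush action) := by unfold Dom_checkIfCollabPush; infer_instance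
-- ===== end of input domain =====

-- B replaces A's counting loop (dict of running counts with an early return) by a filter of the
-- collab-push tokens plus a cardinality comparison len(collab) != len(set(collab)); objective: simpler.

-- ===== PORT A =====
-- the two nested sample-building loops of A (for i in range(1,4): for j in range(len(..)): append)
def pvSampleActionsA : List String :=
  (PySem.List.pyRange 1 4 1).foldl (fun acc i =>
    (PySem.List.pyRange 0 ((["CpushUp","CpushDown","CpushLeft","CpushRight"] : List String).length : Int) 1).foldl
      (fun acc2 j =>
        acc2 ++ [PySem.List.pyGetD (["CpushUp","CpushDown","CpushLeft","CpushRight"] : List String) j "" ++ PySem.Int.toStr i])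
      acc) []

-- A's main for-loop over the split tokens (index loop reading action_arr[i] in order), with the
-- running-count dict and the early 'return True'
def pvLoopA (arr : List String) (samples : List String) (d : PySem.Dict String Int) : Bool :=
  match arr with
  | [] => false
  | a :: rest =>
    if samples.contains a then
      let c : Int := if d.contains a then d.getD a 0 + 1 else 1
      let d' := d.insert a c
      if c ≥ 2 then true else pvLoopA rest samples d'
    else pvLoopA rest samples d

def checkIfCollabPush (action : String) : Bool :=
  -- action.split('X'): the separator is the nonempty literal "X", so split? is always some
  pvLoopA ((PySem.Str.split? action "X").getD []) pvSampleActionsA PySem.Dict.empty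

-- ===== PORT B =====
-- B's set comprehension of the 12 valid collab-push names
def pvSamplesB : PySem.Set String :=
  PySem.Set.ofList ((["CpushUp","CpushDown","CpushLeft","CpushRight"] : List String).flatMap
    (fun name => ([1, 2, 3] : List Int).map (fun i => name ++ PySem.Int.toStr i)))

def checkIfCollabPush_alt (action : String) : Bool :=
  let collab := ((PySem.Str.split? action "X").getD []).filter (fun a => PySem.Set.contains pvSamplesB a)
  collab.length != (PySem.Set.ofList collab).length

-- ===== PRECONDITION & SPEC =====
def Spec_checkIfCollabPush (action : String) (out : Bool) : Prop := out = checkIfCollabPush_alt action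
instance (action : String) (out : Bool) : Decidable (Spec_checkIfCollabPush action out) := by unfold Spec_checkIfCollabPush; infer_instance

-- ===== CLAIM (what is proved, stated in full; the proofs are below) =====
def Claim_equal_checkIfCollabPush : Prop := ∀ (action : String), Dom_checkIfCollabPush action → Spec_checkIfCollabPush action (checkIfCollabPush action)

-- ===== LEMMAS AND PROOFS =====

-- the two ports agree on which tokens are collab-push actions
lemma pv_contains_agree (a : String) :
    decide (a ∈ pvSampleActionsA) = PySem.Set.contains pvSamplesB a := by
  have hperm : pvSampleActionsA.Perm pvSamplesB := by decide
  simp [PySem.Set.contains, List.contains_eq_mem, hperm.mem_iff]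

-- a list and its Python set have equal size iff the list has no duplicate
lemma pv_setlen (m : List String) : (PySem.Set.ofList m).length = m.length ↔ m.Nodup := by
  constructor
  · intro h
    have h1 : (PySem.Set.ofList m).toFinset = m.toFinset := by
      ext x; simp [List.mem_toFinset, PySem.Set.mem_ofList]
    have h2 := List.toFinset_card_of_nodup (PySem.Set.nodup_ofList m)
    have h3 : m.toFinset.card = m.length := by rw [← h1, h2, h]
    have h4 := Multiset.toFinset_card_eq_card_iff_nodup (m := (m : Multiset String))
    simpa using h4.mp (by simpa using h3)
  · intro h; rw [PySem.Set.ofList_eq_self_of_nodup m h]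

lemma pv_bne_setlen (m : List String) :
    (m.length != (PySem.Set.ofList m).length) = decide (¬ m.Nodup) := by
  by_cases h : m.Nodup
  · simp [h, (pv_setlen m).mpr h]
  · have hne : m.length ≠ (PySem.Set.ofList m).length :=
      fun he => h ((pv_setlen m).mp (Eq.symm he))
    simp [h, hne]

-- B with the let body unfolded (definitional), rewritten through pv_bne_setlen
lemma pv_alt_eq (action : String) : checkIfCollabPush_alt action =
    decide (¬ (((PySem.Str.split? action "X").getD []).filter
      (fun a => PySem.Set.contains pvSamplesB a)).Nodup) :=
  pv_bne_setlen _

-- A's counting loop detects exactly a duplicate among the retained (filtered) tokens: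
-- run with dict = Counter(seen), seen duplicate-free, it answers whether seen ++ filtered l repeats
lemma pv_loop_eq (ss l : List String) : ∀ (seen : List String), seen.Nodup →
    pvLoopA l ss (PySem.Dict.counter seen) =
      decide (¬ (seen ++ l.filter (fun x => decide (x ∈ ss))).Nodup) := by
  induction l with
  | nil => intro seen hs; simp [pvLoopA, hs]
  | cons a rest ih =>
    intro seen hs
    by_cases hss : a ∈ ss
    · by_cases hmem : a ∈ seen
      · have hc : (PySem.Dict.counter seen).contains a = true := by
          rw [PySem.Dict.contains_counter, List.contains_eq_mem]; simpa using hmem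
        have hcount : 1 ≤ List.count a seen := List.one_le_count_iff.mpr hmem
        have h2 : (2 : Int) ≤ (List.count a seen : Int) + 1 := by omega
        have hnd : ¬ (seen ++ a :: rest.filter (fun x => decide (x ∈ ss))).Nodup := by
          intro hn
          have := List.nodup_iff_count_le_one.mp hn a
          simp [List.count_append] at this
          omega
        simp [pvLoopA, hss, hc, PySem.Dict.getD_counter, h2, hnd]
      · have hc : (PySem.Dict.counter seen).contains a = false := by
          rw [PySem.Dict.contains_counter]
          simpa [List.contains_eq_mem] using hmem
        have hins : PySem.Dict.counter (seen ++ [a]) = (PySem.Dict.counter seen).insert a 1 := by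
          rw [← PySem.Dict.foldl_insert_getD_add_one_eq_counter (seen ++ [a]), List.foldl_append]
          simp only [List.foldl_cons, List.foldl_nil, PySem.Dict.foldl_insert_getD_add_one_eq_counter]
          rw [PySem.Dict.getD_counter]
          simp [List.count_eq_zero_of_not_mem hmem]
        have hs' : (seen ++ [a]).Nodup := by
          simp [List.nodup_append, hs]
          intro x hx hxa
          exact hmem (hxa ▸ hx)
        have hrec := ih (seen ++ [a]) hs'
        rw [hins] at hrec
        simp [pvLoopA, hss, hc, hrec, List.append_assoc]
    · have hss' : ss.contains a = false := by
        simpa [List.contains_eq_mem] using hss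
      have hfil : List.filter (fun x => decide (x ∈ ss)) (a :: rest)
          = List.filter (fun x => decide (x ∈ ss)) rest := by
        simp [hss]
      simp only [pvLoopA, hss', Bool.false_eq_true, if_false, hfil]
      exact ih seen hs

-- ===== VERDICT (by name: the statement is the Claim_ definition above) =====
theorem checkIfCollabPush_spec : Claim_equal_checkIfCollabPush := by
  intro action _
  show checkIfCollabPush action = checkIfCollabPush_alt action
  rw [pv_alt_eq]
  unfold checkIfCollabPush
  rw [show (PySem.Dict.empty : PySem.Dict String Int) = PySem.Dict.counter [] from rfl,
      pv_loop_eq pvSampleActionsA _ [] List.nodup_nil,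
      List.filter_congr (fun a _ => pv_contains_agree a), List.nil_append]
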